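-- pv_equiv track=rewrite | github.com/pypi-data/pypi-mirror-385 | packages/glitchlings/glitchlings-0.4.4-cp310-cp310-manylinux_2_28_x86_64.whl/glitchlings/zoo/apostrofae.py | _find_quote_pairs
-- ===== SOURCE A (Python) =====
-- def _find_quote_pairs(text: str) -> list[tuple[int, int, str]]:
--     """Return all balanced pairs of straight quotes in ``text``.
--
--     The search walks the string once, pairing sequential occurrences of each quote
--     glyph. Unmatched openers remain untouched so contractions (e.g. ``it's``)
--     survive unmodified.
--     """
--
--     stacks: dict[str, int | None] = {'"': None, "'": None, "`": None}
--     pairs: list[tuple[int, int, str]] = []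
--
--     for index, ch in enumerate(text):
--         if ch not in stacks:
--             continue
--         start = stacks[ch]
--         if start is None:
--             stacks[ch] = index
--         else:
--             pairs.append((start, index, ch))
--             stacks[ch] = None
--
--     return pairs
-- ===== SOURCE B (Python) =====
-- def _pair_up(idxs, quote):
--     pairs = []
--     k = 0
--     while k + 1 < len(idxs):
--         pairs.append((idxs[k], idxs[k + 1], quote))
--         k += 2
--     return pairs
--
--
-- def _find_quote_pairs(text: str) -> list[tuple[int, int, str]]:
--     pairs = []
--     for quote in ('"', "'", "`"):
--         idxs = [i for i, c in enumerate(text) if c == quote]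
--         pairs += _pair_up(idxs, quote)
--     return sorted(pairs, key=lambda p: p[1])
-- ===== Notes on version B (the rewrite author's own statement) =====
-- stated objective: alternative
-- what changed: A walks the string once keeping a per-glyph pending-opener slot in a dict; B instead collects the occurrence-index list of each quote glyph, pairs consecutive occurrences two at a time, and sorts the collected pairs by closing index.
import Mathlib
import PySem

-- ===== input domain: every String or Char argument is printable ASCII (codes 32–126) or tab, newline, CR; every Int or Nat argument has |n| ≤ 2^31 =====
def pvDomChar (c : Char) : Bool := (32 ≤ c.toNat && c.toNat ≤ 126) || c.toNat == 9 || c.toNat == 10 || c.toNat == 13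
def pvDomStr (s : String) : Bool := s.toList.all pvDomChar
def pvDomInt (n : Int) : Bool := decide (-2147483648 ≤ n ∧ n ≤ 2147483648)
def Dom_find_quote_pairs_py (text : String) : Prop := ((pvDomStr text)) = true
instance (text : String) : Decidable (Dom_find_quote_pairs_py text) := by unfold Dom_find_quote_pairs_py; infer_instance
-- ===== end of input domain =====

-- B changes the decomposition: instead of A's one stateful pass with per-quote open slots, it
-- collects the index list of each quote glyph, pairs consecutive occurrences, and sorts by the
-- closing index (objective: alternative decomposition, same cost).

-- ===== PORT A =====
-- literal transliteration of A's single pass with a dict of pending openers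
def find_quote_pairs_py (text : String) : List (Int × Int × String) :=
  let stacks0 : PySem.Dict String (Option Int) :=
    PySem.Dict.ofList [("\"", none), ("'", none), ("`", none)]
  let res := (PySem.List.enumerate text.toList 0).foldl
    (fun (st : PySem.Dict String (Option Int) × List (Int × Int × String)) p =>
      let index := p.1
      let ch := String.singleton p.2
      if st.1.contains ch = false then st
      else
        match st.1.getD ch none with
        | none => (st.1.insert ch (some index), st.2)
        | some start => (st.1.insert ch none, st.2 ++ [(start, index, ch)]))
    (stacks0, ([] : List (Int × Int × String)))
  res.2

-- ===== PORT B =====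
-- B-side helper: the while loop of Source B's _pair_up (k advances by 2, pairing idxs[k], idxs[k+1])
def pvPairUpAux (idxs : List Int) (quote : String) (k : Nat) : List (Int × Int × String) :=
  if h : k + 1 < idxs.length then
    (idxs[k], idxs[k + 1], quote) :: pvPairUpAux idxs quote (k + 2)
  else []
termination_by idxs.length - k

-- literal transliteration of Source B: per glyph, pair up its occurrence indices, then sort by close
def find_quote_pairs_py_alt (text : String) : List (Int × Int × String) :=
  let pairs := [('"' : Char), '\'', '`'].foldl
    (fun acc q =>
      acc ++ pvPairUpAux
        (((PySem.List.enumerate text.toList 0).filter (fun p => p.2 == q)).map (·.1))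
        (String.singleton q) 0)
    []
  PySem.List.sorted pairs (fun p => p.2.1) false

-- ===== PRECONDITION & SPEC =====
def Spec_find_quote_pairs_py (text : String) (out : List (Int × Int × String)) : Prop := out = find_quote_pairs_py_alt text
instance (text : String) (out : List (Int × Int × String)) : Decidable (Spec_find_quote_pairs_py text out) := by unfold Spec_find_quote_pairs_py; infer_instance

-- ===== CLAIM (what is proved, stated in full; the proofs are below) =====
def Claim_equal_find_quote_pairs_py : Prop := ∀ (text : String), Dom_find_quote_pairs_py text → Spec_find_quote_pairs_py text (find_quote_pairs_py text)

-- ===== LEMMAS AND PROOFS =====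

-- A's loop with the dict state flattened to its three slots
def pvLoopA : List (Int × Char) → Option Int → Option Int → Option Int → List (Int × Int × String)
  | [], _, _, _ => []
  | (i, c) :: rest, s1, s2, s3 =>
    if c = '"' then
      match s1 with
      | none => pvLoopA rest (some i) s2 s3
      | some a => (a, i, "\"") :: pvLoopA rest none s2 s3
    else if c = '\'' then
      match s2 with
      | none => pvLoopA rest s1 (some i) s3
      | some a => (a, i, "'") :: pvLoopA rest s1 none s3
    else if c = '`' then
      match s3 with
      | none => pvLoopA rest s1 s2 (some i)
      | some a => (a, i, "`") :: pvLoopA rest s1 s2 none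
    else pvLoopA rest s1 s2 s3

-- structural two-at-a-time pairing (the value computed by pvPairUpAux from 0)
def pvChunks : List Int → String → List (Int × Int × String)
  | a :: b :: rest, q => (a, b, q) :: pvChunks rest q
  | _, _ => []

def pvPos (c : Char) (l : List (Int × Char)) : List Int :=
  (l.filter (fun p => p.2 == c)).map (·.1)

def pvOptL : Option Int → List Int
  | none => []
  | some a => [a]

theorem pvPairUpAux_shift (t : List Int) (q : String) (x : Int) :
    ∀ k, pvPairUpAux (x :: t) q (k + 1) = pvPairUpAux t q k := by
  intro k
  induction hn : t.length - k using Nat.strong_induction_on generalizing k with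
  | _ n ih =>
    conv_lhs => rw [pvPairUpAux]
    conv_rhs => rw [pvPairUpAux]
    by_cases h : k + 1 < t.length
    · have h' : k + 1 + 1 < (x :: t).length := by simp; omega
      rw [dif_pos h', dif_pos h]
      have hrec := ih (t.length - (k + 2)) (by omega) (k + 2) rfl
      simp only [List.getElem_cons_succ]
      rw [show k + 1 + 2 = k + 2 + 1 by omega, hrec]
    · have h' : ¬ (k + 1 + 1 < (x :: t).length) := by simp; omega
      rw [dif_neg h', dif_neg h]

theorem pvPairUpAux_eq_chunks (l : List Int) (q : String) :
    pvPairUpAux l q 0 = pvChunks l q := by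
  induction hn : l.length using Nat.strong_induction_on generalizing l with
  | _ n ih =>
    match l with
    | [] => rw [pvPairUpAux]; rfl
    | [a] => rw [pvPairUpAux]; rfl
    | a :: b :: rest =>
      conv_lhs => rw [pvPairUpAux]
      have h : 0 + 1 < (a :: b :: rest).length := by simp
      rw [dif_pos h]
      rw [show (0:Nat) + 2 = 1 + 1 by omega, pvPairUpAux_shift, pvPairUpAux_shift]
      rw [ih rest.length (by simp [← hn]) rest rfl]
      rfl

-- the step function of A's fold, named for the proofs (definitionally the port's lambda)
def pvStepA (st : PySem.Dict String (Option Int) × List (Int × Int × String))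
    (p : Int × Char) : PySem.Dict String (Option Int) × List (Int × Int × String) :=
  let index := p.1
  let ch := String.singleton p.2
  if st.1.contains ch = false then st
  else
    match st.1.getD ch none with
    | none => (st.1.insert ch (some index), st.2)
    | some start => (st.1.insert ch none, st.2 ++ [(start, index, ch)])

theorem pvSingleton_eq_iff (c d : Char) : String.singleton c = String.singleton d ↔ c = d := by
  constructor
  · intro h
    have := congrArg String.toList h
    simpa [String.singleton] using this
  · intro h; rw [h]

theorem pvSingQ : String.singleton '"' = "\"" := by decide
theorem pvSingA : String.singleton '\'' = "'" := by decide
theorem pvSingB : String.singleton '`' = "`" := by decide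

-- the dict state of A's fold stays the literal three-key dict; flatten it to pvLoopA
theorem pvA_fold_eq (l : List (Int × Char)) :
    ∀ (s1 s2 s3 : Option Int) (acc : List (Int × Int × String)),
    (l.foldl pvStepA (PySem.Dict.ofList [("\"", s1), ("'", s2), ("`", s3)], acc)).2
    = acc ++ pvLoopA l s1 s2 s3 := by
  induction l with
  | nil => intro s1 s2 s3 acc; simp [pvLoopA]
  | cons p rest ih =>
    intro s1 s2 s3 acc
    obtain ⟨i, c⟩ := p
    rw [List.foldl_cons]
    by_cases h1 : c = '"'
    · subst h1
      cases s1 with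
      | none =>
        have hstep : pvStepA (PySem.Dict.ofList [("\"", none), ("'", s2), ("`", s3)], acc) (i, '"')
            = (PySem.Dict.ofList [("\"", some i), ("'", s2), ("`", s3)], acc) := by
          simp [pvStepA, pvSingQ, pvSingA, pvSingB, PySem.Dict.ofList, PySem.Dict.update,
            PySem.Dict.empty, PySem.Dict.contains, PySem.Dict.getD, PySem.Dict.get?,
            PySem.Dict.insert]
        rw [hstep, ih]
        simp only [pvLoopA]
        simp
      | some a =>
        have hstep : pvStepA (PySem.Dict.ofList [("\"", some a), ("'", s2), ("`", s3)], acc) (i, '"')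
            = (PySem.Dict.ofList [("\"", none), ("'", s2), ("`", s3)], acc ++ [(a, i, "\"")]) := by
          simp [pvStepA, pvSingQ, pvSingA, pvSingB, PySem.Dict.ofList, PySem.Dict.update,
            PySem.Dict.empty, PySem.Dict.contains, PySem.Dict.getD, PySem.Dict.get?,
            PySem.Dict.insert]
        rw [hstep, ih]
        simp only [pvLoopA]
        simp
    · by_cases h2 : c = '\''
      · subst h2
        cases s2 with
        | none =>
          have hstep : pvStepA (PySem.Dict.ofList [("\"", s1), ("'", none), ("`", s3)], acc) (i, '\'')
              = (PySem.Dict.ofList [("\"", s1), ("'", some i), ("`", s3)], acc) := by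
            simp [pvStepA, pvSingQ, pvSingA, pvSingB, PySem.Dict.ofList, PySem.Dict.update,
              PySem.Dict.empty, PySem.Dict.contains, PySem.Dict.getD, PySem.Dict.get?,
              PySem.Dict.insert]
          rw [hstep, ih]
          simp only [pvLoopA]
          simp
        | some a =>
          have hstep : pvStepA (PySem.Dict.ofList [("\"", s1), ("'", some a), ("`", s3)], acc) (i, '\'')
              = (PySem.Dict.ofList [("\"", s1), ("'", none), ("`", s3)], acc ++ [(a, i, "'")]) := by
            simp [pvStepA, pvSingQ, pvSingA, pvSingB, PySem.Dict.ofList, PySem.Dict.update,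
              PySem.Dict.empty, PySem.Dict.contains, PySem.Dict.getD, PySem.Dict.get?,
              PySem.Dict.insert]
          rw [hstep, ih]
          simp only [pvLoopA]
          simp
      · by_cases h3 : c = '`'
        · subst h3
          cases s3 with
          | none =>
            have hstep : pvStepA (PySem.Dict.ofList [("\"", s1), ("'", s2), ("`", none)], acc) (i, '`')
                = (PySem.Dict.ofList [("\"", s1), ("'", s2), ("`", some i)], acc) := by
              simp [pvStepA, pvSingQ, pvSingA, pvSingB, PySem.Dict.ofList, PySem.Dict.update,
                PySem.Dict.empty, PySem.Dict.contains, PySem.Dict.getD, PySem.Dict.get?,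
                PySem.Dict.insert]
            rw [hstep, ih]
            simp only [pvLoopA]
            simp
          | some a =>
            have hstep : pvStepA (PySem.Dict.ofList [("\"", s1), ("'", s2), ("`", some a)], acc) (i, '`')
                = (PySem.Dict.ofList [("\"", s1), ("'", s2), ("`", none)], acc ++ [(a, i, "`")]) := by
              simp [pvStepA, pvSingQ, pvSingA, pvSingB, PySem.Dict.ofList, PySem.Dict.update,
                PySem.Dict.empty, PySem.Dict.contains, PySem.Dict.getD, PySem.Dict.get?,
                PySem.Dict.insert]
            rw [hstep, ih]
            simp only [pvLoopA]
            simp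
        · have e1 : ("\"" == String.singleton c) = false := by
            simp only [beq_eq_false_iff_ne, ne_eq]
            intro h; exact h1 ((pvSingleton_eq_iff '"' c).mp (pvSingQ.trans h)).symm
          have e2 : ("'" == String.singleton c) = false := by
            simp only [beq_eq_false_iff_ne, ne_eq]
            intro h; exact h2 ((pvSingleton_eq_iff '\'' c).mp (pvSingA.trans h)).symm
          have e3 : ("`" == String.singleton c) = false := by
            simp only [beq_eq_false_iff_ne, ne_eq]
            intro h; exact h3 ((pvSingleton_eq_iff '`' c).mp (pvSingB.trans h)).symm
          have hstep : pvStepA (PySem.Dict.ofList [("\"", s1), ("'", s2), ("`", s3)], acc) (i, c)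
              = (PySem.Dict.ofList [("\"", s1), ("'", s2), ("`", s3)], acc) := by
            simp [pvStepA, PySem.Dict.ofList, PySem.Dict.update, PySem.Dict.empty,
              PySem.Dict.insert, PySem.Dict.contains, e1, e2, e3]
          rw [hstep, ih]
          simp only [pvLoopA]
          simp [h1, h2, h3]

theorem pvA_eq_loop (text : String) :
    find_quote_pairs_py text = pvLoopA (PySem.List.enumerate text.toList 0) none none none := by
  show ((PySem.List.enumerate text.toList 0).foldl pvStepA
      (PySem.Dict.ofList [("\"", none), ("'", none), ("`", none)], [])).2 = _
  exact pvA_fold_eq (PySem.List.enumerate text.toList 0) none none none []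

-- each closing index of a produced pair is the index of some element of the list
theorem pvLoopA_snd_mem (l : List (Int × Char)) :
    ∀ (s1 s2 s3 : Option Int) (p : Int × Int × String),
      p ∈ pvLoopA l s1 s2 s3 → p.2.1 ∈ l.map (·.1) := by
  induction l with
  | nil => intro _ _ _ p hp; simp [pvLoopA] at hp
  | cons q rest ih =>
    intro s1 s2 s3 p hp
    obtain ⟨i, c⟩ := q
    simp only [pvLoopA] at hp
    simp only [List.map_cons, List.mem_cons]
    split_ifs at hp with h1 h2 h3
    · cases s1 with
      | none => exact Or.inr (ih _ _ _ p hp)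
      | some a =>
        rcases List.mem_cons.mp hp with h | h
        · left; rw [h]
        · exact Or.inr (ih _ _ _ p h)
    · cases s2 with
      | none => exact Or.inr (ih _ _ _ p hp)
      | some a =>
        rcases List.mem_cons.mp hp with h | h
        · left; rw [h]
        · exact Or.inr (ih _ _ _ p h)
    · cases s3 with
      | none => exact Or.inr (ih _ _ _ p hp)
      | some a =>
        rcases List.mem_cons.mp hp with h | h
        · left; rw [h]
        · exact Or.inr (ih _ _ _ p h)
    · exact Or.inr (ih _ _ _ p hp)

-- produced pairs come out strictly increasing in the closing index
theorem pvLoopA_pairwise (l : List (Int × Char))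
    (hl : l.Pairwise (fun p q => p.1 < q.1)) :
    ∀ (s1 s2 s3 : Option Int),
      (pvLoopA l s1 s2 s3).Pairwise (fun a b => a.2.1 < b.2.1) := by
  induction l with
  | nil => intro _ _ _; simp [pvLoopA]
  | cons q rest ih =>
    intro s1 s2 s3
    obtain ⟨i, c⟩ := q
    rw [List.pairwise_cons] at hl
    obtain ⟨hfst, hrest⟩ := hl
    have hgt : ∀ (s1 s2 s3 : Option Int) (p : Int × Int × String),
        p ∈ pvLoopA rest s1 s2 s3 → i < p.2.1 := by
      intro s1 s2 s3 p hp
      have := pvLoopA_snd_mem rest s1 s2 s3 p hp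
      rcases List.mem_map.mp this with ⟨q, hq, hq2⟩
      rw [← hq2]; exact hfst q hq
    simp only [pvLoopA]
    split_ifs with h1 h2 h3
    · cases s1 with
      | none => exact ih hrest _ _ _
      | some a =>
        exact List.pairwise_cons.mpr ⟨fun p hp => hgt _ _ _ p hp, ih hrest _ _ _⟩
    · cases s2 with
      | none => exact ih hrest _ _ _
      | some a =>
        exact List.pairwise_cons.mpr ⟨fun p hp => hgt _ _ _ p hp, ih hrest _ _ _⟩
    · cases s3 with
      | none => exact ih hrest _ _ _
      | some a =>
        exact List.pairwise_cons.mpr ⟨fun p hp => hgt _ _ _ p hp, ih hrest _ _ _⟩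
    · exact ih hrest _ _ _

theorem pvPermMid {α : Type} (x : α) (X Y Z : List α) :
    (x :: (X ++ Y ++ Z)).Perm (X ++ (x :: Y) ++ Z) := by
  have h : X ++ (x :: Y) ++ Z = X ++ x :: (Y ++ Z) := by simp
  rw [h, List.append_assoc]
  exact List.perm_middle.symm

-- the pairs of A's loop are a permutation of the per-glyph chunked occurrence lists
theorem pvLoopA_perm (l : List (Int × Char)) :
    ∀ (s1 s2 s3 : Option Int),
      (pvLoopA l s1 s2 s3).Perm
        (pvChunks (pvOptL s1 ++ pvPos '"' l) "\""
          ++ pvChunks (pvOptL s2 ++ pvPos '\'' l) "'"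
          ++ pvChunks (pvOptL s3 ++ pvPos '`' l) "`") := by
  induction l with
  | nil =>
    intro s1 s2 s3
    cases s1 <;> cases s2 <;> cases s3 <;> simp [pvLoopA, pvPos, pvOptL, pvChunks]
  | cons q rest ih =>
    intro s1 s2 s3
    obtain ⟨i, c⟩ := q
    simp only [pvLoopA]
    by_cases h1 : c = '"'
    · subst h1
      have hp1 : pvPos '"' ((i, '"') :: rest) = i :: pvPos '"' rest := by simp [pvPos]
      have hp2 : pvPos '\'' ((i, '"') :: rest) = pvPos '\'' rest := by simp [pvPos]
      have hp3 : pvPos '`' ((i, '"') :: rest) = pvPos '`' rest := by simp [pvPos]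
      rw [hp1, hp2, hp3, if_pos rfl]
      cases s1 with
      | none => simpa [pvOptL] using ih (some i) s2 s3
      | some a =>
        have : pvChunks (pvOptL (some a) ++ i :: pvPos '"' rest) "\""
            = (a, i, "\"") :: pvChunks (pvOptL (none : Option Int) ++ pvPos '"' rest) "\"" := by
          simp [pvOptL, pvChunks]
        rw [this]
        exact (List.Perm.cons _ (ih none s2 s3)).trans (List.Perm.refl _) |>.trans
          (by simp)
    · by_cases h2 : c = '\''
      · subst h2
        have hp1 : pvPos '"' ((i, '\'') :: rest) = pvPos '"' rest := by simp [pvPos]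
        have hp2 : pvPos '\'' ((i, '\'') :: rest) = i :: pvPos '\'' rest := by simp [pvPos]
        have hp3 : pvPos '`' ((i, '\'') :: rest) = pvPos '`' rest := by simp [pvPos]
        rw [hp1, hp2, hp3, if_neg (by decide), if_pos rfl]
        cases s2 with
        | none => simpa [pvOptL] using ih s1 (some i) s3
        | some a =>
          have hmid : pvChunks (pvOptL (some a) ++ i :: pvPos '\'' rest) "'"
              = (a, i, "'") :: pvChunks (pvOptL (none : Option Int) ++ pvPos '\'' rest) "'" := by
            simp [pvOptL, pvChunks]
          rw [hmid]
          exact (List.Perm.cons _ (ih s1 none s3)).trans (pvPermMid _ _ _ _)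
      · by_cases h3 : c = '`'
        · subst h3
          have hp1 : pvPos '"' ((i, '`') :: rest) = pvPos '"' rest := by simp [pvPos]
          have hp2 : pvPos '\'' ((i, '`') :: rest) = pvPos '\'' rest := by simp [pvPos]
          have hp3 : pvPos '`' ((i, '`') :: rest) = i :: pvPos '`' rest := by simp [pvPos]
          rw [hp1, hp2, hp3, if_neg (by decide), if_neg (by decide), if_pos rfl]
          cases s3 with
          | none => simpa [pvOptL] using ih s1 s2 (some i)
          | some a =>
            have hmid : pvChunks (pvOptL (some a) ++ i :: pvPos '`' rest) "`"
                = (a, i, "`") :: pvChunks (pvOptL (none : Option Int) ++ pvPos '`' rest) "`" := by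
              simp [pvOptL, pvChunks]
            rw [hmid]
            exact (List.Perm.cons _ (ih s1 s2 none)).trans List.perm_middle.symm
        · have hp1 : pvPos '"' ((i, c) :: rest) = pvPos '"' rest := by
            simp [pvPos, h1]
          have hp2 : pvPos '\'' ((i, c) :: rest) = pvPos '\'' rest := by
            simp [pvPos, h2]
          have hp3 : pvPos '`' ((i, c) :: rest) = pvPos '`' rest := by
            simp [pvPos, h3]
          rw [hp1, hp2, hp3, if_neg h1, if_neg h2, if_neg h3]
          exact ih s1 s2 s3

-- ===== VERDICT (by name: the statement is the Claim_ definition above) =====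
theorem find_quote_pairs_py_spec : Claim_equal_find_quote_pairs_py := by
  intro text _
  unfold Spec_find_quote_pairs_py
  rw [pvA_eq_loop]
  unfold find_quote_pairs_py_alt
  simp only [List.foldl_cons, List.foldl_nil, List.nil_append, pvSingQ, pvSingA, pvSingB]
  rw [pvPairUpAux_eq_chunks, pvPairUpAux_eq_chunks, pvPairUpAux_eq_chunks, List.append_assoc]
  have hperm := pvLoopA_perm (PySem.List.enumerate text.toList 0) none none none
  simp only [pvOptL, List.nil_append, pvPos] at hperm
  have hpw := pvLoopA_pairwise (PySem.List.enumerate text.toList 0)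
      (PySem.List.pairwise_lt_enumerate _ _) none none none
  exact (PySem.List.sorted_eq_of_perm_of_pairwise_lt _ _
    (fun p : Int × Int × String => p.2.1)
    (hperm.trans (by rw [List.append_assoc])) hpw).symm
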